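-- pv_equiv track=rewrite | github.com/EvryRNA/alphafold3_for_rna | src/benchmark/models_helper.py | get_index_methods
-- ===== SOURCE A (Python) =====
-- from typing import List
--
-- def get_index_methods(names: List) -> List:
--     all_models = []
--     indexes = []
--     for index, name in enumerate(names):
--         if name not in all_models:
--             indexes.append(index)
--             all_models.append(name)
--     return indexes
-- ===== SOURCE B (Python) =====
-- def get_index_methods(names):
--     unique = list(dict.fromkeys(names))
--     return [names.index(name) for name in unique]
-- ===== Notes on version B (the rewrite author's own statement) =====
-- stated objective: idiomatic
-- what changed: Replaces A's single guarded-accumulation loop (seen-list membership test per element) with a dict.fromkeys ordered dedupe pass followed by a list.index first-occurrence lookup pass.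
import Mathlib
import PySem

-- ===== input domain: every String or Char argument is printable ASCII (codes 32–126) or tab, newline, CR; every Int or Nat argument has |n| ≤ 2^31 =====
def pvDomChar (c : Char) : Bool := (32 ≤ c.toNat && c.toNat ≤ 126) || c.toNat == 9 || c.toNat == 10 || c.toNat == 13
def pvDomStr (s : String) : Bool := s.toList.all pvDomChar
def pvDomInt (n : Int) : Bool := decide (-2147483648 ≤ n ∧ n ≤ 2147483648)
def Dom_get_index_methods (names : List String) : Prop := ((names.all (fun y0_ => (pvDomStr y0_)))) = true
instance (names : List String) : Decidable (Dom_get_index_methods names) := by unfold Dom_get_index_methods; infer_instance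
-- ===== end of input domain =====

-- B replaces A's single guarded-accumulation loop with an ordered dedupe pass (dict.fromkeys)
-- followed by a first-occurrence lookup pass (list.index); proved to return the same list.


-- ===== PORT A =====
-- for index, name in enumerate(names): if name not in all_models: append index; append name
def get_index_methods (names : List String) : List Int :=
  ((PySem.List.enumerate names 0).foldl
    (fun (st : List String × List Int) p =>
      if p.2 ∈ st.1 then st else (st.1 ++ [p.2], st.2 ++ [p.1]))
    ([], [])).2

-- ===== PORT B =====
-- names.index(name) never raises here: every element of dict.fromkeys(names) occurs in names,
-- so index? is some; getD 0 is only a totalisation.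
def get_index_methods_alt (names : List String) : List Int :=
  (PySem.List.dedup names).map (fun n => (((PySem.List.index? names n).getD 0 : Nat) : Int))

-- ===== PRECONDITION & SPEC =====
def Spec_get_index_methods (names : List String) (out : List Int) : Prop := out = get_index_methods_alt names
instance (names : List String) (out : List Int) : Decidable (Spec_get_index_methods names out) := by unfold Spec_get_index_methods; infer_instance

-- ===== CLAIM (what is proved, stated in full; the proofs are below) =====
def Claim_equal_get_index_methods : Prop := ∀ (names : List String), Dom_get_index_methods names → Spec_get_index_methods names (get_index_methods names)

-- ===== LEMMAS AND PROOFS =====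

-- proof-side recursive view of the 'new uniques relative to seen' list
def dedupRel (seen : List String) : List String → List String
  | [] => []
  | n :: ns => if n ∈ seen then dedupRel seen ns else n :: dedupRel (seen ++ [n]) ns

-- proof-side first-occurrence index (total; only used on members)
def fidx (n : String) : List String → Int
  | [] => 0
  | m :: ms => if m = n then 0 else 1 + fidx n ms

theorem dedupRel_cons (seen : List String) (n : String) (ns : List String) :
    dedupRel seen (n :: ns)
      = if n ∈ seen then dedupRel seen ns else n :: dedupRel (seen ++ [n]) ns := rfl

theorem mem_dedupRel {seen ns : List String} {m : String}
    (h : m ∈ dedupRel seen ns) : m ∉ seen ∧ m ∈ ns := by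
  induction ns generalizing seen with
  | nil => simp [dedupRel] at h
  | cons n ns ih =>
    rw [dedupRel_cons] at h
    split at h
    · rcases ih h with ⟨h1, h2⟩
      exact ⟨h1, List.mem_cons_of_mem _ h2⟩
    · rcases List.mem_cons.mp h with rfl | h'
      · exact ⟨by assumption, List.mem_cons_self⟩
      · rcases ih h' with ⟨h1, h2⟩
        simp only [List.mem_append, List.mem_singleton, not_or] at h1
        exact ⟨h1.1, List.mem_cons_of_mem _ h2⟩

-- A's loop produces exactly the dedupRel elements' first indices (with offset s)
theorem loopA_eq (ns : List String) (s : Int) (seen : List String) (idxs : List Int) :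
    ((PySem.List.enumerate ns s).foldl
      (fun (st : List String × List Int) p =>
        if p.2 ∈ st.1 then st else (st.1 ++ [p.2], st.2 ++ [p.1]))
      (seen, idxs)).2
    = idxs ++ (dedupRel seen ns).map (fun n => s + fidx n ns) := by
  induction ns generalizing s seen idxs with
  | nil => simp [PySem.List.enumerate_nil, dedupRel]
  | cons n ns ih =>
    rw [PySem.List.enumerate_cons]
    simp only [List.foldl_cons]
    by_cases hmem : n ∈ seen
    · simp only [hmem, if_true]
      rw [ih, dedupRel_cons, if_pos hmem]
      congr 1
      apply List.map_congr_left
      intro m hm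
      have hne : m ≠ n := fun h => (mem_dedupRel hm).1 (h ▸ hmem)
      simp [fidx, (Ne.symm hne)]
      ring
    · simp only [hmem, if_false]
      rw [ih, dedupRel_cons, if_neg hmem]
      rw [List.map_cons, List.append_assoc, List.singleton_append]
      congr 2
      · simp [fidx]
      · apply List.map_congr_left
        intro m hm
        have hns : m ∉ seen ++ [n] := (mem_dedupRel hm).1
        have hne : m ≠ n := by
          intro h; exact hns (by simp [h])
        simp [fidx, (Ne.symm hne)]
        ring

-- B's dedup (dict.fromkeys) coincides with the relative recursive view
theorem foldl_add_eq_dedupRel (ns : List String) (acc : List String) :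
    ns.foldl PySem.Set.add acc = acc ++ dedupRel acc ns := by
  induction ns generalizing acc with
  | nil => simp [dedupRel]
  | cons n ns ih =>
    simp only [List.foldl_cons, PySem.Set.add]
    rw [dedupRel_cons]
    by_cases hmem : n ∈ acc
    · rw [if_pos (by simpa [PySem.Set.contains] using hmem), if_pos hmem]
      exact ih acc
    · rw [if_neg (by simpa [PySem.Set.contains] using hmem), if_neg hmem]
      rw [ih (acc ++ [n]), List.append_assoc, List.singleton_append]

-- on members, Python's .index equals the proof-side first-occurrence index
theorem index?_eq_fidx (ns : List String) (n : String) (h : n ∈ ns) :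
    (((PySem.List.index? ns n).getD 0 : Nat) : Int) = fidx n ns := by
  induction ns with
  | nil => simp at h
  | cons m ms ih =>
    by_cases hmn : m = n
    · subst hmn
      rw [PySem.List.index?_cons_self]
      simp [fidx]
    · rw [PySem.List.index?_cons_of_ne ms hmn]
      have hm : n ∈ ms := by
        rcases List.mem_cons.mp h with h' | h'
        · exact absurd h'.symm hmn
        · exact h'
      rcases Option.isSome_iff_exists.mp ((PySem.List.index?_isSome_iff ms n).mpr hm) with ⟨k, hk⟩
      have := ih hm
      rw [hk] at this ⊢
      simp only [Option.map_some, Option.getD_some] at this ⊢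
      simp only [fidx, hmn, if_false, ← this]
      push_cast
      ring

-- ===== VERDICT (by name: the statement is the Claim_ definition above) =====
theorem get_index_methods_spec : Claim_equal_get_index_methods := by
  intro names _
  unfold Spec_get_index_methods get_index_methods get_index_methods_alt
  rw [loopA_eq names 0 [] []]
  have hd : PySem.List.dedup names = dedupRel [] names := by
    simpa [PySem.List.dedup, PySem.Set.ofList, PySem.Set.empty] using
      foldl_add_eq_dedupRel names []
  rw [hd, List.nil_append]
  apply List.map_congr_left
  intro m hm
  rw [index?_eq_fidx names m (mem_dedupRel hm).2]
  ring
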